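-- pv_equiv track=rewrite | github.com/ExiledOfCode/InferEngineServer | backend/app/services/inference_service.py | _normalize_model_id
-- ===== SOURCE A (Python) =====
-- def _normalize_model_id(value: str) -> str:
--     raw = str(value or "").strip().lower()
--     if not raw:
--         return "default"
--     normalized = []
--     for ch in raw:
--         normalized.append(ch if ch.isalnum() else "_")
--     result = "".join(normalized).strip("_")
--     while "__" in result:
--         result = result.replace("__", "_")
--     return result or "default"
-- ===== SOURCE B (Python) =====
-- def _normalize_model_id(value: str) -> str:
--     raw = str(value or "").strip().lower()
--     words = []
--     cur = []
--     for ch in raw: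
--         if ch.isalnum():
--             cur.append(ch)
--         elif cur:
--             words.append("".join(cur))
--             cur = []
--     if cur:
--         words.append("".join(cur))
--     return "_".join(words) or "default"
-- ===== Notes on version B (the rewrite author's own statement) =====
-- stated objective: simpler
-- what changed: Instead of mapping every character to itself-or-underscore, joining, stripping underscores at the ends and then repeatedly collapsing doubled underscores until none remain, B tokenizes the lowered string into maximal alphanumeric runs in one pass and joins the runs with single underscores, which makes the strip step and the collapse loop disappear.
import Mathlib
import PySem

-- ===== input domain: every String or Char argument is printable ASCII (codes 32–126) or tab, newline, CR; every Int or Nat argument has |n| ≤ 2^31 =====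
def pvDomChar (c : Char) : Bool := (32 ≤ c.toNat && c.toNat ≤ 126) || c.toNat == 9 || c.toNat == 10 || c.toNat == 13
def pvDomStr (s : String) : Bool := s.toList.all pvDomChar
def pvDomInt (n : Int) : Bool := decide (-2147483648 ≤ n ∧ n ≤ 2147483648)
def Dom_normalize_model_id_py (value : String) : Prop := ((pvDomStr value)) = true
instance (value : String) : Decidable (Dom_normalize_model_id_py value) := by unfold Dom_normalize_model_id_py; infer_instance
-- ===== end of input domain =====

-- B replaces A's map/join/strip + repeated '__'-replace loop by a single tokenize-into-alnum-runs
-- pass joined with single underscores; same return value, simpler structure (objective: simpler).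

-- ===== PORT A =====
-- Python's `while "__" in result: result = result.replace("__", "_")` as a fuel loop; the fuel
-- `result.length` is enough because each replace strictly shortens the list (proved below).
def pvCollapse : Nat → List Char → List Char
  | 0, r => r
  | fuel+1, r =>
    if PySem.Chars.isIn ['_', '_'] r then
      pvCollapse fuel (PySem.Chars.replace r ['_', '_'] ['_'])
    else r

-- `str(value or "")` is `value` itself for a str argument; `"".join(normalized)` keeps the
-- accumulated character list.
def normalize_model_id_py (value : String) : String :=
  let raw := PySem.Str.lower (PySem.Str.strip value)
  if raw = "" then "default"
  else
    let normalized := raw.toList.foldl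
      (fun acc ch => acc ++ [if PySem.Chars.isalnum ch then ch else '_']) []
    let result := PySem.Chars.stripChars normalized ['_']
    let result := pvCollapse result.length result
    if result = [] then "default" else String.mk result

-- ===== PORT B =====
-- loop body of Source B: grow the current alnum run, or flush it into `words` at a non-alnum char
def pvStep (st : List (List Char) × List Char) (ch : Char) : List (List Char) × List Char :=
  if PySem.Chars.isalnum ch then (st.1, st.2 ++ [ch])
  else if st.2 ≠ [] then (st.1 ++ [st.2], ([] : List Char))
  else st

def normalize_model_id_py_alt (value : String) : String :=
  let raw := PySem.Str.lower (PySem.Str.strip value)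
  let st := raw.toList.foldl pvStep ([], [])
  let words := if st.2 ≠ [] then st.1 ++ [st.2] else st.1
  let joined := PySem.Chars.join ['_'] words
  if joined = [] then "default" else String.mk joined

-- ===== PRECONDITION & SPEC =====
def Spec_normalize_model_id_py (value : String) (out : String) : Prop := out = normalize_model_id_py_alt value
instance (value : String) (out : String) : Decidable (Spec_normalize_model_id_py value out) := by unfold Spec_normalize_model_id_py; infer_instance

-- ===== CLAIM (what is proved, stated in full; the proofs are below) =====
def Claim_equal_normalize_model_id_py : Prop := ∀ (value : String), Dom_normalize_model_id_py value → Spec_normalize_model_id_py value (normalize_model_id_py value)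

-- ===== LEMMAS AND PROOFS =====

-- proof-side vocabulary ------------------------------------------------------

def pvF (c : Char) : Char := if PySem.Chars.isalnum c then c else '_'

def pvP (c : Char) : Bool := decide (c = '_')

def pvLst (m : List Char) : List Char := List.dropWhile pvP m
def pvRst (m : List Char) : List Char := (List.dropWhile pvP m.reverse).reverse
def pvStrip (m : List Char) : List Char := pvRst (pvLst m)

-- squeeze: collapse every run of underscores to a single underscore
def pvSq : List Char → List Char
  | [] => []
  | [c] => [c]
  | a :: b :: t => if a = '_' ∧ b = '_' then pvSq (b :: t) else a :: pvSq (b :: t)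

-- one pass of result.replace("__", "_")
def pvRep : List Char → List Char
  | [] => []
  | [c] => [c]
  | a :: b :: t => if a = '_' ∧ b = '_' then '_' :: pvRep t else a :: pvRep (b :: t)

-- maximal alphanumeric runs
def pvToksA : List Char → List (List Char)
  | [] => []
  | c :: t =>
    if PySem.Chars.isalnum c then
      (c :: t.takeWhile PySem.Chars.isalnum) :: pvToksA (t.dropWhile PySem.Chars.isalnum)
    else pvToksA t
termination_by l => l.length
decreasing_by
  · simpa using Nat.lt_succ_of_le (List.length_dropWhile_le _ _)
  · simp

-- accumulator form of B's fold
def pvRuns : List Char → List Char → List (List Char) × List Char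
  | cur, [] => ([], cur)
  | cur, ch :: t =>
    if PySem.Chars.isalnum ch then pvRuns (cur ++ [ch]) t
    else if cur ≠ [] then
      ((pvRuns [] t).1.cons cur, (pvRuns [] t).2)
    else pvRuns [] t

-- equation helpers ------------------------------------------------------------

theorem pvSq_nil : pvSq [] = [] := by simp [pvSq]

theorem pvToksA_nilEq : pvToksA [] = [] := by rw [pvToksA]

theorem pvSq_cc (t : List Char) : pvSq ('_' :: '_' :: t) = pvSq ('_' :: t) := by
  simp [pvSq]

theorem pvSq_nc {a b : Char} (t : List Char) (h : ¬ (a = '_' ∧ b = '_')) :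
    pvSq (a :: b :: t) = a :: pvSq (b :: t) := by
  simp [pvSq, h]

theorem pvRep_cc (t : List Char) : pvRep ('_' :: '_' :: t) = '_' :: pvRep t := by
  simp [pvRep]

theorem pvRep_nc {a b : Char} (t : List Char) (h : ¬ (a = '_' ∧ b = '_')) :
    pvRep (a :: b :: t) = a :: pvRep (b :: t) := by
  simp [pvRep, h]

theorem pvToksA_cons (c : Char) (t : List Char) :
    pvToksA (c :: t) = if PySem.Chars.isalnum c then
      (c :: t.takeWhile PySem.Chars.isalnum) :: pvToksA (t.dropWhile PySem.Chars.isalnum)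
    else pvToksA t := by
  rw [pvToksA]

theorem pvRuns_cons (cur : List Char) (ch : Char) (t : List Char) :
    pvRuns cur (ch :: t) =
      if PySem.Chars.isalnum ch then pvRuns (cur ++ [ch]) t
      else if cur ≠ [] then ((pvRuns [] t).1.cons cur, (pvRuns [] t).2)
      else pvRuns [] t := by
  rw [pvRuns]

-- tiny character facts -------------------------------------------------------

theorem pvP_contains : (fun c => List.contains ['_'] c) = pvP := by
  funext c; simp [pvP]

theorem pvP_underscore : pvP '_' = true := by simp [pvP]

theorem pvP_alnum {c : Char} (h : PySem.Chars.isalnum c = true) : pvP c = false := by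
  by_cases hc : c = '_'
  · subst hc; exact absurd h (by decide)
  · simp [pvP, hc]

theorem pvF_alnum {c : Char} (h : PySem.Chars.isalnum c = true) : pvF c = c := by
  simp [pvF, h]

theorem pvF_not {c : Char} (h : PySem.Chars.isalnum c = false) : pvF c = '_' := by
  simp [pvF, h]

theorem alnum_ne_underscore {c : Char} (h : PySem.Chars.isalnum c = true) : c ≠ '_' := by
  intro hc; subst hc; exact absurd h (by decide)

theorem mapF_alnum {w : List Char} (h : ∀ c ∈ w, PySem.Chars.isalnum c = true) :
    w.map pvF = w := by
  induction w with
  | nil => rfl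
  | cons a t ih =>
    simp only [List.map_cons, pvF_alnum (h a (by simp)), ih (fun c hc => h c (by simp [hc]))]

theorem mapF_nonalnum {u : List Char} (h : ∀ c ∈ u, PySem.Chars.isalnum c = false) :
    u.map pvF = List.replicate u.length '_' := by
  induction u with
  | nil => rfl
  | cons a t ih =>
    simp only [List.map_cons, pvF_not (h a (by simp)), List.length_cons,
      List.replicate_succ, ih (fun c hc => h c (by simp [hc]))]

theorem dropWhile_all_false {p : Char → Bool} {x : List Char}
    (h : ∀ a ∈ x, p a = false) : List.dropWhile p x = x := by
  cases x with
  | nil => rfl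
  | cons a t => simp [List.dropWhile_cons, h a (by simp)]

theorem dropWhile_replicate_underscore (j : Nat) (x : List Char) :
    List.dropWhile pvP (List.replicate j '_' ++ x) = List.dropWhile pvP x := by
  induction j with
  | zero => rfl
  | succ n ih => simp [List.replicate_succ, List.dropWhile_cons, pvP_underscore, ih]

theorem dw_head {p : Char → Bool} {t t' : List Char} {c : Char}
    (h : List.dropWhile p t = c :: t') : p c = false := by
  induction t with
  | nil => simp at h
  | cons a s ih =>
    rw [List.dropWhile_cons] at h
    by_cases ha : p a
    · simp [ha] at h; exact ih h
    · simp [ha] at h; rw [← h.1]; simpa using ha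

-- squeeze lemmas --------------------------------------------------------------

theorem sq_cons (a : Char) (l : List Char) :
    pvSq (a :: l) = if a = '_' ∧ l.head? = some '_' then pvSq l else a :: pvSq l := by
  cases l with
  | nil => simp [pvSq]
  | cons b t => simp [pvSq]

theorem sq_word {w : List Char} (h : ∀ c ∈ w, c ≠ '_') (l : List Char) :
    pvSq (w ++ l) = w ++ pvSq l := by
  induction w with
  | nil => rfl
  | cons a t ih =>
    rw [List.cons_append, sq_cons]
    have ha : a ≠ '_' := h a (by simp)
    simp [ha, ih (fun c hc => h c (by simp [hc]))]

theorem sq_run (j : Nat) {l : List Char} (h : l.head? ≠ some '_') :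
    pvSq (List.replicate (j + 1) '_' ++ l) = '_' :: pvSq l := by
  induction j with
  | zero =>
    rw [show List.replicate 1 '_' ++ l = '_' :: l by simp [List.replicate_succ]]
    rw [sq_cons]; simp [h]
  | succ n ih =>
    rw [List.replicate_succ, List.cons_append, sq_cons]
    have hh : (List.replicate (n + 1) '_' ++ l).head? = some '_' := by
      simp [List.replicate_succ]
    simp [hh, ih]

theorem sq_of_not_infix {l : List Char} (h : ¬ ['_', '_'] <:+: l) : pvSq l = l := by
  induction l using pvSq.induct with
  | case1 => rfl
  | case2 c => rfl
  | case3 a b t hab ih =>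
    obtain ⟨ha, hb⟩ := hab; subst ha; subst hb
    exact absurd (⟨[], t, rfl⟩ : ['_', '_'] <:+: ('_' :: '_' :: t)) h
  | case4 a b t hab ih =>
    have hbt : ¬ ['_', '_'] <:+: (b :: t) := fun hi => h (hi.trans (List.suffix_cons a (b :: t)).isInfix)
    rw [pvSq_nc t hab, ih hbt]

-- pvRep lemmas ----------------------------------------------------------------

theorem rep_head (l : List Char) : (pvRep l).head? = l.head? := by
  induction l using pvRep.induct with
  | case1 => rfl
  | case2 c => rfl
  | case3 a b t hab ih =>
    obtain ⟨ha, hb⟩ := hab; subst ha; subst hb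
    rw [pvRep_cc]; rfl
  | case4 a b t hab ih => rw [pvRep_nc t hab]; rfl

theorem rep_len_le (l : List Char) : (pvRep l).length ≤ l.length := by
  induction l using pvRep.induct with
  | case1 => simp [pvRep]
  | case2 c => simp [pvRep]
  | case3 a b t hab ih =>
    obtain ⟨ha, hb⟩ := hab; subst ha; subst hb
    rw [pvRep_cc]; simp only [List.length_cons]; omega
  | case4 a b t hab ih =>
    rw [pvRep_nc t hab]; simp only [List.length_cons] at ih ⊢; omega

theorem rep_len_lt {l : List Char} (h : ['_', '_'] <:+: l) : (pvRep l).length < l.length := by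
  induction l using pvRep.induct with
  | case1 => have := h.length_le; simp at this
  | case2 c => have := h.length_le; simp at this
  | case3 a b t hab ih =>
    obtain ⟨ha, hb⟩ := hab; subst ha; subst hb
    have := rep_len_le t
    rw [pvRep_cc]; simp only [List.length_cons]; omega
  | case4 a b t hab ih =>
    have hbt : ['_', '_'] <:+: (b :: t) := by
      rcases (List.infix_cons_iff.mp h) with hp | hi
      · rcases List.cons_prefix_cons.mp hp with ⟨ha, hp2⟩
        rcases List.cons_prefix_cons.mp hp2 with ⟨hb, _⟩
        exact absurd ⟨ha.symm, hb.symm⟩ hab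
      · exact hi
    have := ih hbt
    rw [pvRep_nc t hab]; simp only [List.length_cons] at this ⊢; omega

theorem sq_rep (l : List Char) : pvSq (pvRep l) = pvSq l := by
  induction l using pvRep.induct with
  | case1 => rfl
  | case2 c => rfl
  | case3 a b t hab ih =>
    obtain ⟨ha, hb⟩ := hab; subst ha; subst hb
    rw [pvRep_cc, pvSq_cc, sq_cons '_' (pvRep t), rep_head, sq_cons '_' t, ih]
  | case4 a b t hab ih =>
    rw [pvRep_nc t hab, sq_cons a (pvRep (b :: t)), sq_cons a (b :: t), rep_head, ih]

-- the replace bridge ----------------------------------------------------------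

theorem go_nil (fuel : Nat) (acc : List Char) :
    PySem.Chars.replace.go ['_', '_'] ['_'] fuel [] acc = acc.reverse := by
  cases fuel with
  | zero =>
    conv_lhs => rw [PySem.Chars.replace.go]
    simp
  | succ n =>
    rw [PySem.Chars.replace.go]
    omega

theorem go_cons (fuel : Nat) (c : Char) (t acc : List Char) :
    PySem.Chars.replace.go ['_', '_'] ['_'] (fuel+1) (c :: t) acc =
      if List.isPrefixOf ['_', '_'] (c :: t) then
        PySem.Chars.replace.go ['_', '_'] ['_'] fuel (List.drop 2 (c :: t)) ('_' :: acc)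
      else PySem.Chars.replace.go ['_', '_'] ['_'] fuel t (c :: acc) := by
  conv_lhs => rw [PySem.Chars.replace.go]
  rfl

theorem go_eq : ∀ (fuel : Nat) (l acc : List Char), l.length ≤ fuel →
    PySem.Chars.replace.go ['_', '_'] ['_'] fuel l acc = acc.reverse ++ pvRep l := by
  intro fuel
  induction fuel with
  | zero =>
    intro l acc h
    have : l = [] := by cases l <;> simp_all
    subst this
    rw [go_nil]; simp [pvRep]
  | succ n ih =>
    intro l acc h
    match l with
    | [] => rw [go_nil]; simp [pvRep]
    | [c] =>
      rw [go_cons]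
      have hpre : List.isPrefixOf ['_', '_'] [c] = false := by
        simp [List.isPrefixOf]
      rw [hpre]
      simp only [Bool.false_eq_true, if_false]
      rw [ih [] (c :: acc) (by simp)]
      simp [pvRep]
    | a :: b :: t =>
      rw [go_cons]
      by_cases hab : a = '_' ∧ b = '_'
      · obtain ⟨ha, hb⟩ := hab; subst ha; subst hb
        have hpre : List.isPrefixOf ['_', '_'] ('_' :: '_' :: t) = true := by
          simp [List.isPrefixOf]
        rw [hpre]
        simp only [if_true]
        have ht : t.length ≤ n := by simp at h; omega
        rw [show List.drop 2 ('_' :: '_' :: t) = t from rfl]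
        rw [ih t _ ht, pvRep_cc]
        simp
      · have hpre : List.isPrefixOf ['_', '_'] (a :: b :: t) = false := by
          rcases (not_and_or.mp hab) with ha | hb
          · simp [List.isPrefixOf, Ne.symm ha]
          · simp [List.isPrefixOf, Ne.symm hb]
        rw [hpre]
        simp only [Bool.false_eq_true, if_false]
        rw [ih (b :: t) (a :: acc) (by simp at h ⊢; omega), pvRep_nc t hab]
        simp

theorem replace_eq (r : List Char) : PySem.Chars.replace r ['_', '_'] ['_'] = pvRep r := by
  rw [PySem.Chars.replace]
  simp only [List.isEmpty_cons, Bool.false_eq_true, if_false]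
  rw [go_eq r.length r [] (le_refl _)]
  simp

-- the while loop computes pvSq ------------------------------------------------

theorem pvCollapse_eq : ∀ (fuel : Nat) (r : List Char), r.length ≤ fuel →
    pvCollapse fuel r = pvSq r := by
  intro fuel
  induction fuel with
  | zero =>
    intro r h
    have : r = [] := by cases r <;> simp_all
    subst this; rfl
  | succ n ih =>
    intro r h
    rw [pvCollapse]
    by_cases hin : PySem.Chars.isIn ['_', '_'] r = true
    · have hinf : ['_', '_'] <:+: r := (PySem.Chars.isIn_iff_infix _ _).mp hin
      rw [if_pos hin, replace_eq]
      have hlt : (pvRep r).length < r.length := rep_len_lt hinf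
      rw [ih (pvRep r) (by omega), sq_rep]
    · have hninf : ¬ ['_', '_'] <:+: r :=
        (PySem.Chars.isIn_eq_false_iff _ _).mp (by simpa using hin)
      rw [if_neg hin, sq_of_not_infix hninf]

-- strip lemmas ----------------------------------------------------------------

theorem stripChars_eq (m : List Char) :
    PySem.Chars.stripChars m ['_'] = pvStrip m := by
  rw [PySem.Chars.stripChars, pvP_contains]
  rfl

theorem strip_cons_underscore (x : List Char) : pvStrip ('_' :: x) = pvStrip x := by
  simp [pvStrip, pvLst, List.dropWhile_cons, pvP_underscore]

theorem rst_append {x y : List Char} (h : ∃ a ∈ y, pvP a = false) :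
    pvRst (x ++ y) = x ++ pvRst y := by
  have hne : List.dropWhile pvP y.reverse ≠ [] := by
    intro hcontra
    rw [List.dropWhile_eq_nil_iff] at hcontra
    obtain ⟨a, ha, hpa⟩ := h
    exact absurd (hcontra a (by simpa using ha)) (by simp [hpa])
  rw [pvRst, List.reverse_append, List.dropWhile_append]
  simp only [List.isEmpty_iff, hne, if_false]
  rw [List.reverse_append, List.reverse_reverse]
  rfl

theorem rst_prefix (y : List Char) : pvRst y <+: y := by
  obtain ⟨t, ht⟩ := List.dropWhile_suffix (l := y.reverse) (p := pvP)
  refine ⟨t.reverse, ?_⟩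
  rw [pvRst, ← List.reverse_append, ht, List.reverse_reverse]

theorem rst_ne_nil {y : List Char} (h : ∃ a ∈ y, pvP a = false) : pvRst y ≠ [] := by
  have hne : List.dropWhile pvP y.reverse ≠ [] := by
    intro hcontra
    rw [List.dropWhile_eq_nil_iff] at hcontra
    obtain ⟨a, ha, hpa⟩ := h
    exact absurd (hcontra a (by simpa using ha)) (by simp [hpa])
  simpa [pvRst] using hne

theorem rst_head {y : List Char} (h : ∃ a ∈ y, pvP a = false) :
    (pvRst y).head? = y.head? := by
  obtain ⟨t, ht⟩ := rst_prefix y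
  have hne := rst_ne_nil h
  conv_rhs => rw [← ht]
  rw [List.head?_append_of_ne_nil _ hne]

theorem strip_of_head_not {c : Char} {y : List Char} (hy : y.head? = some c)
    (hc : pvP c = false) : pvStrip y = pvRst y := by
  cases y with
  | nil => simp at hy
  | cons a t =>
    simp only [List.head?_cons, Option.some.injEq] at hy
    subst hy
    simp [pvStrip, pvLst, List.dropWhile_cons, hc]

theorem strip_word_run {c : Char} {w : List Char} (hc : pvP c = false)
    (hw : ∀ a ∈ w, pvP a = false) (j : Nat) :
    pvStrip ((c :: w) ++ List.replicate j '_') = c :: w := by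
  have hlst : pvLst ((c :: w) ++ List.replicate j '_') = (c :: w) ++ List.replicate j '_' := by
    simp [pvLst, List.dropWhile_cons, hc]
  rw [pvStrip, hlst, pvRst, List.reverse_append, List.reverse_replicate,
    dropWhile_replicate_underscore]
  rw [dropWhile_all_false (by
    intro a ha
    simp only [List.mem_reverse, List.mem_cons] at ha
    rcases ha with h1 | h2
    · exact h1 ▸ hc
    · exact hw a h2)]
  simp

theorem strip_word_run_rest {c : Char} {w : List Char} (hc : pvP c = false)
    (j : Nat) {y : List Char} (hy : ∃ a ∈ y, pvP a = false) :
    pvStrip ((c :: w) ++ (List.replicate j '_' ++ y)) =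
      (c :: w) ++ (List.replicate j '_' ++ pvRst y) := by
  have hlst : pvLst ((c :: w) ++ (List.replicate j '_' ++ y)) =
      (c :: w) ++ (List.replicate j '_' ++ y) := by
    simp [pvLst, List.dropWhile_cons, hc]
  rw [pvStrip, hlst, show (c :: w) ++ (List.replicate j '_' ++ y) =
    ((c :: w) ++ List.replicate j '_') ++ y by simp, rst_append hy]
  simp

-- toksA lemmas ----------------------------------------------------------------

theorem toksA_skip {u : List Char} (h : ∀ a ∈ u, PySem.Chars.isalnum a = false)
    (x : List Char) : pvToksA (u ++ x) = pvToksA x := by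
  induction u with
  | nil => rfl
  | cons a t ih =>
    rw [List.cons_append, pvToksA_cons, if_neg (by simp [h a (by simp)])]
    exact ih (fun c hc => h c (by simp [hc]))

-- the core lemma: squeeze-of-strip-of-map = join of alnum runs ------------------

theorem pvCore : ∀ (n : Nat) (l : List Char), l.length ≤ n →
    pvSq (pvStrip (l.map pvF)) = PySem.Chars.join ['_'] (pvToksA l) := by
  intro n
  induction n with
  | zero =>
    intro l h
    have : l = [] := by cases l <;> simp_all
    subst this
    simp [pvStrip, pvLst, pvRst, pvSq, pvToksA, PySem.Chars.join_nil]
  | succ n ih =>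
    intro l hl
    match l with
    | [] => simp [pvStrip, pvLst, pvRst, pvSq, pvToksA, PySem.Chars.join_nil]
    | c :: t =>
      by_cases hc : PySem.Chars.isalnum c = true
      · -- alphanumeric head: a maximal run starts here
        have hw : ∀ a ∈ t.takeWhile PySem.Chars.isalnum, PySem.Chars.isalnum a = true :=
          fun a ha => List.mem_takeWhile_imp ha
        have ht : t = t.takeWhile PySem.Chars.isalnum ++ t.dropWhile PySem.Chars.isalnum :=
          (List.takeWhile_append_dropWhile).symm
        set w := t.takeWhile PySem.Chars.isalnum with hw_def
        set r := t.dropWhile PySem.Chars.isalnum with hr_def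
        have hu : ∀ a ∈ r.takeWhile (fun c => !PySem.Chars.isalnum c),
            PySem.Chars.isalnum a = false := by
          intro a ha
          have := List.mem_takeWhile_imp ha
          simpa using this
        have hru : r = r.takeWhile (fun c => !PySem.Chars.isalnum c) ++
            r.dropWhile (fun c => !PySem.Chars.isalnum c) :=
          (List.takeWhile_append_dropWhile).symm
        set u := r.takeWhile (fun c => !PySem.Chars.isalnum c) with hu_def
        set r1 := r.dropWhile (fun c => !PySem.Chars.isalnum c) with hr1_def
        have hmap : (c :: t).map pvF = (c :: w) ++ (List.replicate u.length '_' ++ r1.map pvF) := by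
          rw [List.map_cons, pvF_alnum hc]
          conv_lhs => rw [ht, hru]
          rw [List.map_append, List.map_append, mapF_alnum hw, mapF_nonalnum hu]
          simp
        have hwne : ∀ a ∈ (c :: w), a ≠ '_' := by
          intro a ha
          rcases List.mem_cons.mp ha with h1 | h2
          · exact h1 ▸ alnum_ne_underscore hc
          · exact alnum_ne_underscore (hw a h2)
        have hwP : ∀ a ∈ w, pvP a = false := fun a ha => pvP_alnum (hw a ha)
        have htoks : pvToksA (c :: t) = (c :: w) :: pvToksA r1 := by
          rw [pvToksA_cons, if_pos hc, ← hw_def, ← hr_def]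
          congr 1
          conv_lhs => rw [hru]
          exact toksA_skip hu r1
        cases hr1 : r1 with
        | nil =>
          -- everything after the run is underscores (possibly none)
          rw [hmap, hr1]
          simp only [List.map_nil, List.append_nil]
          rw [strip_word_run (pvP_alnum hc) hwP u.length]
          have hsq : pvSq (c :: w) = c :: w := by
            have := sq_word hwne []
            simpa [pvSq_nil] using this
          rw [hsq, htoks, hr1, pvToksA_nilEq, PySem.Chars.join_singleton]
        | cons c' t1 =>
          have hc' : PySem.Chars.isalnum c' = true := by
            have := dw_head (hr1 ▸ hr1_def.symm : r.dropWhile (fun c => !PySem.Chars.isalnum c) = c' :: t1)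
            simpa using this
          -- u is nonempty: the head of r fails isalnum
          have hrne : r ≠ [] := by
            rw [hru, hr1]; simp
          obtain ⟨d, rt, hd⟩ : ∃ d rt, r = d :: rt := by
            cases hr : r with
            | nil => exact absurd hr hrne
            | cons d rt => exact ⟨d, rt, rfl⟩
          have hdna : PySem.Chars.isalnum d = false :=
            dw_head (hd ▸ hr_def.symm : t.dropWhile PySem.Chars.isalnum = d :: rt)
          have hune : u ≠ [] := by
            rw [hu_def, hd]
            simp [List.takeWhile_cons, hdna]
          obtain ⟨j, hj⟩ : ∃ j, u.length = j + 1 := by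
            cases hu0 : u with
            | nil => exact absurd hu0 hune
            | cons _ us => exact ⟨us.length, by simp⟩
          have hm1head : (r1.map pvF).head? = some c' := by
            rw [hr1]; simp [pvF_alnum hc']
          have hm1ex : ∃ a ∈ r1.map pvF, pvP a = false := by
            refine ⟨c', ?_, pvP_alnum hc'⟩
            rw [hr1]; simp [pvF_alnum hc']
          have hr1len : r1.length ≤ n := by
            have h1 : r1.length ≤ r.length := hr1_def ▸ List.length_dropWhile_le _ _
            have h2 : r.length ≤ t.length := hr_def ▸ List.length_dropWhile_le _ _
            have h3 : t.length + 1 ≤ n + 1 := by simpa using hl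
            omega
          have hrsthead : (pvRst (r1.map pvF)).head? = some c' := by
            rw [rst_head hm1ex, hm1head]
          -- left side
          rw [hmap, strip_word_run_rest (pvP_alnum hc) u.length hm1ex]
          rw [sq_word hwne, hj, sq_run j (by rw [hrsthead]; simp [alnum_ne_underscore hc'])]
          -- apply induction hypothesis to r1
          have hih := ih r1 hr1len
          rw [strip_of_head_not hm1head (pvP_alnum hc')] at hih
          rw [hih]
          -- right side
          rw [htoks]
          have htoksr1 : pvToksA r1 = (c' :: t1.takeWhile PySem.Chars.isalnum) ::
              pvToksA (t1.dropWhile PySem.Chars.isalnum) := by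
            rw [hr1, pvToksA_cons, if_pos hc']
          rw [htoksr1, PySem.Chars.join_cons_cons, ← htoksr1]
          simp
      · -- non-alphanumeric head: it is dropped by the strip on the left, skipped by toksA
        have hcf : PySem.Chars.isalnum c = false := by simpa using hc
        have hmap : (c :: t).map pvF = '_' :: t.map pvF := by
          rw [List.map_cons, pvF_not hcf]
        rw [hmap, strip_cons_underscore]
        rw [pvToksA_cons, if_neg (by simp [hcf])]
        exact ih t (by simp at hl; omega)

-- A's mapping fold builds List.map pvF ----------------------------------------

theorem foldA (l : List Char) : ∀ acc,
    l.foldl (fun acc ch => acc ++ [if PySem.Chars.isalnum ch then ch else '_']) acc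
      = acc ++ l.map pvF := by
  induction l with
  | nil => intro acc; simp
  | cons a t ih =>
    intro acc
    rw [List.foldl_cons, ih]
    simp [pvF]

-- B's fold computes pvRuns -----------------------------------------------------

theorem foldB (l : List Char) : ∀ (ws : List (List Char)) (cur : List Char),
    l.foldl pvStep (ws, cur) = (ws ++ (pvRuns cur l).1, (pvRuns cur l).2) := by
  induction l with
  | nil => intro ws cur; simp [pvRuns]
  | cons ch t ih =>
    intro ws cur
    rw [List.foldl_cons]
    by_cases hch : PySem.Chars.isalnum ch = true
    · rw [show pvStep (ws, cur) ch = (ws, cur ++ [ch]) by simp [pvStep, hch]]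
      rw [ih, pvRuns_cons, if_pos hch]
    · have hchf : PySem.Chars.isalnum ch = false := by simpa using hch
      by_cases hcur : cur = []
      · subst hcur
        rw [show pvStep (ws, ([] : List Char)) ch = (ws, []) by simp [pvStep, hchf]]
        rw [ih, pvRuns_cons]
        simp [hchf]
      · rw [show pvStep (ws, cur) ch = (ws ++ [cur], []) by simp [pvStep, hchf, hcur]]
        rw [ih, pvRuns_cons]
        simp [hchf, hcur]

-- the flushed word list is the run tokenization --------------------------------

theorem wordsEq (l : List Char) : ∀ (cur : List Char),
    (if (pvRuns cur l).2 ≠ [] then (pvRuns cur l).1 ++ [(pvRuns cur l).2] else (pvRuns cur l).1)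
      = if cur ≠ [] then (cur ++ l.takeWhile PySem.Chars.isalnum) ::
          pvToksA (l.dropWhile PySem.Chars.isalnum) else pvToksA l := by
  induction l with
  | nil =>
    intro cur
    by_cases hcur : cur = [] <;> simp [pvRuns, hcur, pvToksA]
  | cons ch t ih =>
    intro cur
    by_cases hch : PySem.Chars.isalnum ch = true
    · rw [pvRuns_cons, if_pos hch]
      rw [ih (cur ++ [ch])]
      simp only [List.takeWhile_cons, List.dropWhile_cons, hch, if_true]
      by_cases hcur : cur = []
      · subst hcur
        simp [pvToksA_cons, hch]
      · simp [hcur]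
    · have hchf : PySem.Chars.isalnum ch = false := by simpa using hch
      have htt : pvToksA (ch :: t) = pvToksA t := by rw [pvToksA_cons, if_neg (by simp [hchf])]
      by_cases hcur : cur = []
      · subst hcur
        rw [pvRuns_cons]
        simp only [hchf, Bool.false_eq_true, if_false, ne_eq, not_true_eq_false, if_false]
        have := ih ([] : List Char)
        simp only [ne_eq, not_true_eq_false, if_false] at this ⊢
        rw [this, htt]
      · rw [pvRuns_cons]
        simp only [hchf, Bool.false_eq_true, if_false, hcur, ne_eq, not_false_eq_true, if_true]
        have hih := ih ([] : List Char)
        simp only [ne_eq, not_true_eq_false, if_false] at hih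
        simp only [List.takeWhile_cons, List.dropWhile_cons, hchf, Bool.false_eq_true, if_false,
          hcur, ne_eq, not_false_eq_true, if_true, List.append_nil]
        rw [htt, ← hih]
        by_cases h2 : (pvRuns ([] : List Char) t).2 = [] <;> simp [h2, List.cons_append]

-- final assembly helpers ------------------------------------------------------

theorem ifcongr (X Y : List Char) (h : X = Y) :
    (if X = [] then "default" else String.mk X) = (if Y = [] then "default" else String.mk Y) := by
  rw [h]

theorem hBlem (L : List Char) :
    PySem.Chars.join ['_'] (if (List.foldl pvStep ([], []) L).2 ≠ [] then
        (List.foldl pvStep ([], []) L).1 ++ [(List.foldl pvStep ([], []) L).2]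
      else (List.foldl pvStep ([], []) L).1) = PySem.Chars.join ['_'] (pvToksA L) := by
  rw [foldB L [] []]
  have hw := wordsEq L ([] : List Char)
  simp only [ne_eq, not_true_eq_false, if_false] at hw
  rw [List.nil_append, hw]

theorem hAlem (L : List Char) :
    pvCollapse (PySem.Chars.stripChars
        (List.foldl (fun acc ch => acc ++ [if PySem.Chars.isalnum ch then ch else '_']) [] L) ['_']).length
      (PySem.Chars.stripChars
        (List.foldl (fun acc ch => acc ++ [if PySem.Chars.isalnum ch then ch else '_']) [] L) ['_'])
      = PySem.Chars.join ['_'] (pvToksA L) := by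
  rw [foldA L [], List.nil_append, stripChars_eq, pvCollapse_eq _ _ (le_refl _)]
  exact pvCore L.length L (le_refl _)

-- ===== VERDICT (by name: the statement is the Claim_ definition above) =====
theorem normalize_model_id_py_spec : Claim_equal_normalize_model_id_py := by
  intro value _
  unfold Spec_normalize_model_id_py
  unfold normalize_model_id_py normalize_model_id_py_alt
  simp only []
  set raw := PySem.Str.lower (PySem.Str.strip value) with hraw
  by_cases hempty : raw = ""
  · rw [hempty]
    simp [PySem.Chars.join_nil]
  · rw [if_neg hempty]
    exact ifcongr _ _ ((hAlem raw.toList).trans (hBlem raw.toList).symm)
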